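-- pv_equiv track=rewrite | github.com/toniale/DSC20 | homeworks/hw08.py | find_two_sums_rec
-- ===== SOURCE A (Python) =====
-- def find_two_sums_rec(main, sub):
--     """
--     A recursive function that takes two sequences of numeric values
--     (main and sub), and calculates two kinds of sum of the main sequence:
--     1) Sum of intersection: the sum of all numbers in the main sequence that
--        also appear in the sub sequence.
--     2) Sum of differences: the sum of all numbers in the main sequence that
--        do not appear in the sub sequence.
--
--
--     >>> main_seq = [0, 1, 1, 2, 3, 3, 4, 5, 5]
--     >>> find_two_sums_rec(main_seq, [])
--     (0, 24)
--     >>> find_two_sums_rec(main_seq, [1, 2])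
--     (4, 20)
--     >>> find_two_sums_rec(main_seq, [3, 4, 5])
--     (20, 4)
--
--     >>> main_seq_2 = [2, 4, 6, 8, 10, 10]
--     >>> find_two_sums_rec(main_seq_2, [])
--     (0, 40)
--     >>> find_two_sums_rec(main_seq_2, [2, 10])
--     (22, 18)
--     >>> find_two_sums_rec(main_seq_2, [1])
--     (0, 40)
--     """
--     if len(main) == 0:
--         return (0, 0)
--     else:
--         # check if val in main is in sub
--         if main[0] in sub:
--             #new sum of next set of values(rest of main); returns a tuple
--             new_sum = find_two_sums_rec(main[1:], sub)
--             # add the inter's sum index(0) to main[0] to update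
--             return (new_sum[0] + main[0], new_sum[1])
--         elif main[0] not in sub:
--             # sum of the remaining values in main to add onto old new sum
--             next_new_sum = find_two_sums_rec(main[1:], sub)
--             # keep the intersection sum, but add main[0] to the other element
--             return (next_new_sum[0], next_new_sum[1] + main[0])
-- ===== SOURCE B (Python) =====
-- def find_two_sums_rec(main, sub):
--     inter = 0
--     diff = 0
--     for x in main:
--         if x in sub:
--             inter += x
--         else:
--             diff += x
--     return (inter, diff)
-- ===== Notes on version B (the rewrite author's own statement) =====
-- stated objective: idiomatic
-- what changed: Replaces the recursion (one frame per element, rebuilding a pair at each level) with a single flat loop carrying two integer accumulators; membership still tested against the list sub.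
import Mathlib
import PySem

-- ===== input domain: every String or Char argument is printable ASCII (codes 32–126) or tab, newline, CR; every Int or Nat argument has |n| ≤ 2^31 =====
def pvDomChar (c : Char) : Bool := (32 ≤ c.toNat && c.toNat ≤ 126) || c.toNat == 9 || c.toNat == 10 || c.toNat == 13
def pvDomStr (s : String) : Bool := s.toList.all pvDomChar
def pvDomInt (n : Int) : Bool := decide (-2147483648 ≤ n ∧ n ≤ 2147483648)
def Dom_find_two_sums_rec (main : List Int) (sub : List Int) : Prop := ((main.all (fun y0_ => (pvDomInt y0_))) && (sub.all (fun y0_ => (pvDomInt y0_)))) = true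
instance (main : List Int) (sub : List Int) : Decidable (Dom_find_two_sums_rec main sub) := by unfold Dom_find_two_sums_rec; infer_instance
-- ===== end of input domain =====

-- B replaces A's recursion with a flat loop over main carrying two accumulators (idiomatic; same cost).
-- Python returns a pair (inter, diff); per the type convention it is modelled as the two-element list [inter, diff].

-- ===== PORT A =====
def find_two_sums_rec (main : List Int) (sub : List Int) : List Int :=
  match main with
  | [] => [0, 0]
  | x :: rest =>
    if x ∈ sub then
      let new_sum := find_two_sums_rec rest sub
      [new_sum[0]! + x, new_sum[1]!]
    else
      let next_new_sum := find_two_sums_rec rest sub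
      [next_new_sum[0]!, next_new_sum[1]! + x]

-- ===== PORT B =====
def find_two_sums_rec_alt (main : List Int) (sub : List Int) : List Int :=
  let p := main.foldl (fun (acc : Int × Int) x =>
    if x ∈ sub then (acc.1 + x, acc.2) else (acc.1, acc.2 + x)) (0, 0)
  [p.1, p.2]

-- ===== PRECONDITION & SPEC =====
def Spec_find_two_sums_rec (main : List Int) (sub : List Int) (out : List Int) : Prop := out = find_two_sums_rec_alt main sub
instance (main : List Int) (sub : List Int) (out : List Int) : Decidable (Spec_find_two_sums_rec main sub out) := by unfold Spec_find_two_sums_rec; infer_instance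

-- ===== CLAIM (what is proved, stated in full; the proofs are below) =====
def Claim_equal_find_two_sums_rec : Prop := ∀ (main : List Int) (sub : List Int), Dom_find_two_sums_rec main sub → Spec_find_two_sums_rec main sub (find_two_sums_rec main sub)

-- ===== LEMMAS AND PROOFS =====

-- A's recursion computes exactly [inter-sum, diff-sum].
theorem find_two_sums_rec_eq (main sub : List Int) :
    find_two_sums_rec main sub =
      [((main.filter (fun x => decide (x ∈ sub))).sum),
       ((main.filter (fun x => !decide (x ∈ sub))).sum)] := by
  induction main with
  | nil => simp [find_two_sums_rec]
  | cons x rest ih =>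
    by_cases h : x ∈ sub <;>
      simp [find_two_sums_rec, h, ih] <;> ring

-- B's foldl, generalised over the accumulator.
theorem alt_foldl_eq (main sub : List Int) (a b : Int) :
    main.foldl (fun (acc : Int × Int) x =>
      if x ∈ sub then (acc.1 + x, acc.2) else (acc.1, acc.2 + x)) (a, b) =
      (a + (main.filter (fun x => decide (x ∈ sub))).sum,
       b + (main.filter (fun x => !decide (x ∈ sub))).sum) := by
  induction main generalizing a b with
  | nil => simp
  | cons x rest ih =>
    by_cases h : x ∈ sub <;>
      simp [h, ih] <;> ring_nf

-- ===== VERDICT (by name: the statement is the Claim_ definition above) =====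
theorem find_two_sums_rec_spec : Claim_equal_find_two_sums_rec := by
  intro main sub _
  unfold Spec_find_two_sums_rec find_two_sums_rec_alt
  rw [find_two_sums_rec_eq, alt_foldl_eq]
  simp
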